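-- pv_equiv track=rewrite | github.com/Unnathi-CS/Code_cubicle_5.0_deployment_2 | Slack_ingestion/slack_pathway/src/ai_service.py | find_relevant_messages
-- ===== SOURCE A (Python) =====
-- from typing import List, Dict, Any
--
-- def find_relevant_messages(query: str, messages: List[Dict], top_k: int = 5) -> List[Dict]:
--     """Find most relevant messages for a query using keyword matching."""
--     if not messages:
--         return []
--
--     # Extract keywords from query
--     query_words = set(query.lower().split())
--
--     # Score messages based on keyword matches
--     scored_messages = []
--     for msg in messages:
--         msg_text = msg.get('text', '').lower()
--         msg_words = set(msg_text.split())
--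
--         # Calculate simple keyword overlap score
--         overlap = len(query_words.intersection(msg_words))
--         if overlap > 0:
--             scored_messages.append((overlap, msg))
--
--     # Sort by score and return top_k
--     scored_messages.sort(key=lambda x: x[0], reverse=True)
--
--     # If no keyword matches, return recent messages
--     if not scored_messages:
--         return sorted(messages, key=lambda x: x.get('ts', ''), reverse=True)[:top_k]
--
--     return [msg for _, msg in scored_messages[:top_k]]
-- ===== SOURCE B (Python) =====
-- def find_relevant_messages(query, messages, top_k=5):
--     """Find most relevant messages for a query using keyword matching."""
--     if not messages:
--         return []
--
--     query_words = set(query.lower().split())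
--
--     def overlap(msg):
--         return len(query_words & set(msg.get('text', '').lower().split()))
--
--     scored = [(overlap(m), m) for m in messages if overlap(m) > 0]
--
--     # If no keyword matches, return recent messages
--     if not scored:
--         return sorted(messages, key=lambda x: x.get('ts', ''), reverse=True)[:top_k]
--
--     def rank(pairs):
--         # three-way quicksort on the score, descending; stable because every
--         # partition is a filter that keeps the original message order
--         if not pairs:
--             return []
--         pivot = pairs[0][0]
--         greater = [p for p in pairs if p[0] > pivot]
--         equal = [m for s, m in pairs if s == pivot]
--         less = [p for p in pairs if p[0] < pivot]
--         return rank(greater) + equal + rank(less)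
--
--     return rank(scored)[:top_k]
-- ===== Notes on version B (the rewrite author's own statement) =====
-- stated objective: alternative
-- what changed: Replaces the build-(score,msg)-tuples-then-library-sort with a recursive three-way quicksort on the overlap score (partition into greater/equal/less by filtering, which keeps ties stable, then recurse), keeping A's empty-messages and no-match fallback paths.
import Mathlib
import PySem

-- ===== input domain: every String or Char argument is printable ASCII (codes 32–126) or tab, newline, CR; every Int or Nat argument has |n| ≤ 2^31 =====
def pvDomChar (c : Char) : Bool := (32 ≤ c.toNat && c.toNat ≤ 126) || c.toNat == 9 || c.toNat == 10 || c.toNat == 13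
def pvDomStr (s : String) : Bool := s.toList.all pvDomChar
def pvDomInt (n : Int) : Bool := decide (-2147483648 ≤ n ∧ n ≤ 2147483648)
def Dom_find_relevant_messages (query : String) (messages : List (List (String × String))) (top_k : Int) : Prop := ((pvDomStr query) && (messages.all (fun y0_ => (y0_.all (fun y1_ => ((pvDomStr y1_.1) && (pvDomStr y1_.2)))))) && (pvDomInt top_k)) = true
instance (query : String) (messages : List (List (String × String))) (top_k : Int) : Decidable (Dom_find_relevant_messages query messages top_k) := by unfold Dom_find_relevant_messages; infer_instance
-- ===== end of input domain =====

-- B replaces A's build-tuples-then-library-sort with a recursive three-way quicksort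
-- on the overlap score (filter-partition into greater/equal/less, recurse; stable on
-- ties); same return value, objective: alternative algorithm of similar cost.

-- ===== PORT A =====
-- shared tokenisation: set(s.lower().split())
def pvWords (s : String) : PySem.Set String :=
  PySem.Set.ofList (PySem.Str.split₀ (PySem.Str.lower s))

-- len(query_words & set(msg.get('text','').lower().split())) as a Python int
def pvOverlap (qw : PySem.Set String) (msg : List (String × String)) : Int :=
  ((PySem.Set.inter qw (pvWords ((PySem.Dict.mk msg).getD "text" ""))).length : Int)

def find_relevant_messages (query : String) (messages : List (List (String × String))) (top_k : Int) : List (List (String × String)) :=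
  if messages = [] then []
  else
    let query_words := pvWords query
    let scored_messages := messages.foldl (fun acc msg =>
      if 0 < pvOverlap query_words msg then acc ++ [(pvOverlap query_words msg, msg)] else acc) []
    -- scored_messages.sort(key=lambda x: x[0], reverse=True)  (in-place; return value only)
    let sorted_scored := PySem.List.sorted scored_messages (fun x => x.1) true
    if sorted_scored = [] then
      PySem.List.slice (PySem.List.sorted messages (fun x => (PySem.Dict.mk x).getD "ts" "") true) none (some top_k)
    else
      (PySem.List.slice sorted_scored none (some top_k)).map (fun p => p.2)

-- ===== PORT B =====
-- rank(pairs): three-way quicksort on the score, descending (stable: partitions are filters)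
def pvRank (pairs : List (Int × List (String × String))) : List (List (String × String)) :=
  match pairs with
  | [] => []
  | (pivot, m) :: rest =>
    pvRank (((pivot, m) :: rest).filter (fun p => decide (pivot < p.1)))
      ++ (((pivot, m) :: rest).filter (fun p => p.1 == pivot)).map Prod.snd
      ++ pvRank (((pivot, m) :: rest).filter (fun p => decide (p.1 < pivot)))
termination_by pairs.length
decreasing_by
  · simp only [List.filter_cons, decide_eq_true_eq, lt_self_iff_false, if_false, List.length_cons]
    have := List.length_filter_le (fun p => decide (pivot < p.1)) rest
    omega
  · simp only [List.filter_cons, decide_eq_true_eq, lt_self_iff_false, if_false, List.length_cons]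
    have := List.length_filter_le (fun p => decide (p.1 < pivot)) rest
    omega

def find_relevant_messages_alt (query : String) (messages : List (List (String × String))) (top_k : Int) : List (List (String × String)) :=
  if messages = [] then []
  else
    let query_words := pvWords query
    -- scored = [(overlap(m), m) for m in messages if overlap(m) > 0]
    let scored := (messages.filter (fun m => decide (0 < pvOverlap query_words m))).map
      (fun m => (pvOverlap query_words m, m))
    if scored = [] then
      PySem.List.slice (PySem.List.sorted messages (fun x => (PySem.Dict.mk x).getD "ts" "") true) none (some top_k)
    else
      PySem.List.slice (pvRank scored) none (some top_k)

-- ===== PRECONDITION & SPEC =====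
def Spec_find_relevant_messages (query : String) (messages : List (List (String × String))) (top_k : Int) (out : List (List (String × String))) : Prop := out = find_relevant_messages_alt query messages top_k
instance (query : String) (messages : List (List (String × String))) (top_k : Int) (out : List (List (String × String))) : Decidable (Spec_find_relevant_messages query messages top_k out) := by unfold Spec_find_relevant_messages; infer_instance

-- ===== CLAIM (what is proved, stated in full; the proofs are below) =====
def Claim_equal_find_relevant_messages : Prop := ∀ (query : String) (messages : List (List (String × String))) (top_k : Int), Dom_find_relevant_messages query messages top_k → Spec_find_relevant_messages query messages top_k (find_relevant_messages query messages top_k)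

-- ===== LEMMAS AND PROOFS =====

-- insertBy walks past a prefix it does not insert into
theorem pv_insertBy_append_left {α : Type} (bef : α → α → Bool) (x : α) (A B : List α)
    (h : ∀ a ∈ A, bef x a = false) :
    PySem.List.insertBy bef x (A ++ B) = A ++ PySem.List.insertBy bef x B := by
  induction A with
  | nil => rfl
  | cons a A ih =>
    simp only [List.cons_append, PySem.List.insertBy, h a (by simp)]
    simp only [Bool.false_eq_true, if_false, List.cons.injEq, true_and]
    exact ih (fun a ha => h a (by simp [ha]))

-- insertBy prepends when it precedes everything
theorem pv_insertBy_all_true {α : Type} (bef : α → α → Bool) (x : α) (L : List α)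
    (h : ∀ a ∈ L, bef x a = true) :
    PySem.List.insertBy bef x L = x :: L := by
  cases L with
  | nil => rfl
  | cons y ys => simp [PySem.List.insertBy, h y (by simp)]

-- appending one element to a stable reverse sort is one insertBy
theorem pv_sortedRev_snoc {α κ : Type} [LinearOrder κ] (P : List α) (x : α) (key : α → κ) :
    PySem.List.sorted (P ++ [x]) key true
      = PySem.List.insertBy (fun a b => decide (key b < key a)) x (PySem.List.sorted P key true) := by
  rw [PySem.List.sorted_rev_eq_foldl_insertBy, PySem.List.sorted_rev_eq_foldl_insertBy,
    List.foldl_append]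
  rfl

-- the workhorse: inserting x into a bucket concatenation over strictly descending keys
theorem pv_bucket_insert {α κ : Type} [LinearOrder κ] [BEq κ] [LawfulBEq κ]
    (key : α → κ) (x : α) (P : List α) (D : List κ)
    (hD : D.Pairwise (fun a b => b < a))
    (hcov : key x ∈ D ∨ P.filter (fun p => key p == key x) = []) :
    PySem.List.insertBy (fun a b => decide (key b < key a)) x
        (D.flatMap (fun k => P.filter (fun p => key p == k)))
      = (if key x ∈ D then D
         else PySem.List.insertBy (fun a b => decide (b < a)) (key x) D).flatMap
          (fun k => (P ++ [x]).filter (fun p => key p == k)) := by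
  induction D with
  | nil =>
    have hfil : P.filter (fun p => key p == key x) = [] := by
      rcases hcov with h | h
      · simp at h
      · exact h
    simp [PySem.List.insertBy, List.filter_append, hfil]
  | cons d D ih =>
    have hdD : ∀ b ∈ D, b < d := fun b hb => List.rel_of_pairwise_cons hD hb
    have hDp : D.Pairwise (fun a b => b < a) := hD.of_cons
    have hkey : ∀ (k : κ) (a : α), a ∈ P.filter (fun p => key p == k) → key a = k := by
      intro k a ha
      have := (List.mem_filter.1 ha).2
      exact eq_of_beq this
    rcases lt_trichotomy (key x) d with h1 | h2 | h3
    · -- key x < d : x goes past bucket d, recurse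
      have hne : key x ≠ d := ne_of_lt h1
      have hcov' : key x ∈ D ∨ P.filter (fun p => key p == key x) = [] := by
        rcases hcov with h | h
        · rcases List.mem_cons.1 h with h | h
          · exact absurd h hne
          · exact Or.inl h
        · exact Or.inr h
      have hbd : ∀ a ∈ P.filter (fun p => key p == d), (fun a b => decide (key b < key a)) x a = false := by
        intro a ha
        have := hkey d a ha
        simp [this, not_lt_of_gt h1]
      rw [List.flatMap_cons, pv_insertBy_append_left _ _ _ _ hbd, ih hDp hcov']
      have hxd : ((fun a b => decide (b < a)) (key x) d) = false := by
        simp [not_lt_of_gt h1]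
      have hfd : (P ++ [x]).filter (fun p => key p == d) = P.filter (fun p => key p == d) := by
        simp [List.filter_append, hne]
      by_cases hc : key x ∈ D
      · simp [List.mem_cons, hne, hc, List.flatMap_cons]
      · have : key x ∉ d :: D := by simp [hne, hc]
        simp only [List.mem_cons, hne, false_or, hc, if_false]
        have hins : PySem.List.insertBy (fun a b => decide (b < a)) (key x) (d :: D)
            = d :: PySem.List.insertBy (fun a b => decide (b < a)) (key x) D := by
          simp [PySem.List.insertBy, hxd]
        rw [hins, List.flatMap_cons, hfd]
    · -- key x = d : x appended to its own bucket
      have hxD : key x ∉ D := by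
        intro hmem
        have := hdD _ hmem
        rw [h2] at this
        exact lt_irrefl d this
      have hbd : ∀ a ∈ P.filter (fun p => key p == d), (fun a b => decide (key b < key a)) x a = false := by
        intro a ha
        have := hkey d a ha
        simp [this, h2]
      have hall : ∀ a ∈ D.flatMap (fun k => P.filter (fun p => key p == k)),
          (fun a b => decide (key b < key a)) x a = true := by
        intro a ha
        rcases List.mem_flatMap.1 ha with ⟨k, hk, hak⟩
        have := hkey k a hak
        have hlt : k < d := hdD k hk
        simp [this, h2 ▸ hlt]
      rw [List.flatMap_cons, pv_insertBy_append_left _ _ _ _ hbd, pv_insertBy_all_true _ _ _ hall]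
      have hmem : key x ∈ d :: D := by simp [h2]
      simp only [hmem, if_true, List.flatMap_cons]
      have hfd : (P ++ [x]).filter (fun p => key p == d) = P.filter (fun p => key p == d) ++ [x] := by
        simp [List.filter_append, h2]
      rw [hfd]
      have hcg : D.flatMap (fun k => (P ++ [x]).filter (fun p => key p == k))
          = D.flatMap (fun k => P.filter (fun p => key p == k)) := by
        apply List.flatMap_congr
        intro k hk
        have : key x ≠ k := by
          intro h
          exact hxD (h ▸ hk)
        simp [List.filter_append, this]
      rw [hcg]
      simp
    · -- d < key x : x precedes everything
      have hnotmem : key x ∉ d :: D := by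
        intro hmem
        rcases List.mem_cons.1 hmem with h | h
        · exact lt_irrefl _ (h ▸ h3)
        · exact lt_asymm h3 (hdD _ h)
      have hfil : P.filter (fun p => key p == key x) = [] := hcov.resolve_left hnotmem
      have hall : ∀ a ∈ (d :: D).flatMap (fun k => P.filter (fun p => key p == k)),
          (fun a b => decide (key b < key a)) x a = true := by
        intro a ha
        rcases List.mem_flatMap.1 ha with ⟨k, hk, hak⟩
        have hake := hkey k a hak
        have hkd : k ≤ d := by
          rcases List.mem_cons.1 hk with h | h
          · exact le_of_eq h
          · exact le_of_lt (hdD k h)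
        simp [hake, lt_of_le_of_lt hkd h3]
      rw [pv_insertBy_all_true _ _ _ hall]
      simp only [hnotmem, if_false]
      have hins : PySem.List.insertBy (fun a b => decide (b < a)) (key x) (d :: D)
          = key x :: d :: D := by
        simp [PySem.List.insertBy, h3]
      rw [hins]
      have hfx : (P ++ [x]).filter (fun p => key p == key x) = [x] := by
        simp [List.filter_append, hfil]
      have hcg : (d :: D).flatMap (fun k => (P ++ [x]).filter (fun p => key p == k))
          = (d :: D).flatMap (fun k => P.filter (fun p => key p == k)) := by
        apply List.flatMap_congr
        intro k hk
        have : key x ≠ k := by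
          intro h
          exact hnotmem (h ▸ hk)
        simp [List.filter_append, this]
      conv_rhs => rw [List.flatMap_cons]
      rw [hfx, hcg]
      simp

-- stable reverse sort = descending distinct keys, each key's elements in input order
theorem pv_sortedRev_eq_flatMap {α κ : Type} [LinearOrder κ] [BEq κ] [LawfulBEq κ]
    (P : List α) (key : α → κ) :
    PySem.List.sorted P key true
      = (PySem.List.sorted (PySem.Set.ofList (P.map key)) (fun k => k) true).flatMap
          (fun k => P.filter (fun p => key p == k)) := by
  induction P using List.reverseRecOn with
  | nil => rfl
  | append_singleton P x ih =>
    have hD : (PySem.List.sorted (PySem.Set.ofList (P.map key)) (fun k => k) true).Pairwise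
        (fun a b => b < a) := by
      have h1 := PySem.List.sorted_pairwise_rev (PySem.Set.ofList (P.map key)) (fun k => k)
      have h2 : (PySem.List.sorted (PySem.Set.ofList (P.map key)) (fun k => k) true).Nodup :=
        (PySem.List.sorted_perm _ _ _).nodup_iff.2 (PySem.Set.nodup_ofList _)
      exact (h1.and h2).imp (fun h => lt_of_le_of_ne h.1 (Ne.symm h.2))
    have hcov : key x ∈ PySem.List.sorted (PySem.Set.ofList (P.map key)) (fun k => k) true
        ∨ P.filter (fun p => key p == key x) = [] := by
      by_cases hmem : key x ∈ PySem.Set.ofList (P.map key)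
      · exact Or.inl ((PySem.List.mem_sorted _ _ _ _).2 hmem)
      · refine Or.inr (List.filter_eq_nil_iff.2 ?_)
        intro p hp hbeq
        exact hmem ((PySem.Set.mem_ofList _ _).2 (List.mem_map.2 ⟨p, hp, eq_of_beq hbeq⟩))
    rw [pv_sortedRev_snoc, ih, pv_bucket_insert key x P _ hD hcov]
    have hofl : PySem.Set.ofList ((P ++ [x]).map key)
        = PySem.Set.add (PySem.Set.ofList (P.map key)) (key x) := by
      rw [List.map_append, PySem.Set.ofList_eq_foldl, List.foldl_append,
        ← PySem.Set.ofList_eq_foldl]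
      rfl
    have hmem_iff : ∀ S : PySem.Set κ, (PySem.Set.contains S (key x) = true) ↔ key x ∈ S := by
      intro S
      simp [PySem.Set.contains]
    by_cases hmem : key x ∈ PySem.Set.ofList (P.map key)
    · have hc : PySem.Set.contains (PySem.Set.ofList (P.map key)) (key x) = true :=
        (hmem_iff _).2 hmem
      have hifc : key x ∈ PySem.List.sorted (PySem.Set.ofList (P.map key)) (fun k => k) true :=
        (PySem.List.mem_sorted _ _ _ _).2 hmem
      rw [hofl]
      simp only [PySem.Set.add, hc, if_true, hifc]
    · have hc : PySem.Set.contains (PySem.Set.ofList (P.map key)) (key x) = false := by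
        rw [← Bool.not_eq_true, hmem_iff]
        exact hmem
      have hifc : key x ∉ PySem.List.sorted (PySem.Set.ofList (P.map key)) (fun k => k) true := by
        rw [PySem.List.mem_sorted]
        exact hmem
      rw [hofl]
      simp only [PySem.Set.add, hc, Bool.false_eq_true, if_false, hifc]
      rw [pv_sortedRev_snoc (PySem.Set.ofList (P.map key)) (key x) (fun k => k)]

-- slice with default bounds commutes with map (it only reads the length)
theorem pv_slice_map {α β : Type} (f : α → β) (l : List α) (b : Int) :
    PySem.List.slice (l.map f) none (some b) = (PySem.List.slice l none (some b)).map f := by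
  simp [PySem.List.slice, List.map_take]

-- a strictly descending list splits around any of its members
theorem pv_desc_split (D : List Int) (s : Int) (hD : D.Pairwise (fun a b => b < a)) (hs : s ∈ D) :
    D = D.filter (fun k => decide (s < k)) ++ [s] ++ D.filter (fun k => decide (k < s)) := by
  induction D with
  | nil => simp at hs
  | cons d D ih =>
    have hdD : ∀ b ∈ D, b < d := fun b hb => List.rel_of_pairwise_cons hD hb
    rcases List.mem_cons.1 hs with h | h
    · subst h
      have h1 : D.filter (fun k => decide (s < k)) = [] := by
        refine List.filter_eq_nil_iff.2 ?_
        intro k hk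
        simp [not_lt_of_gt (hdD k hk)]
      have h2 : D.filter (fun k => decide (k < s)) = D := by
        refine List.filter_eq_self.2 ?_
        intro k hk
        simp [hdD k hk]
      simp [h1, h2]
    · have hsd : s < d := hdD s h
      have h2 : decide (d < s) = false := by simp [not_lt_of_gt hsd]
      have := ih hD.of_cons h
      simp only [List.filter_cons, hsd, decide_true, if_true, h2, Bool.false_eq_true, if_false]
      conv_lhs => rw [this]
      simp

-- the quicksort equals the stable reverse sort, projected to messages
theorem pvRank_eq (pairs : List (Int × List (String × String))) :
    pvRank pairs = (PySem.List.sorted pairs (fun p => p.1) true).map Prod.snd := by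
  induction pairs using pvRank.induct with
  | case1 => rw [pvRank]; rfl
  | case2 pivot m rest ih_gt ih_lt =>
    set P : List (Int × List (String × String)) := (pivot, m) :: rest with hP
    set D := PySem.List.sorted (PySem.Set.ofList (P.map (fun p => p.1))) (fun k => k) true with hD
    have hDpw : D.Pairwise (fun a b => b < a) := by
      have h1 := PySem.List.sorted_pairwise_rev (PySem.Set.ofList (P.map (fun p => p.1))) (fun k => k)
      have h2 : D.Nodup :=
        (PySem.List.sorted_perm _ _ _).nodup_iff.2 (PySem.Set.nodup_ofList _)
      exact (h1.and h2).imp (fun h => lt_of_le_of_ne h.1 (Ne.symm h.2))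
    have hDnodup : D.Nodup :=
      (PySem.List.sorted_perm _ _ _).nodup_iff.2 (PySem.Set.nodup_ofList _)
    have hmemD : ∀ k : Int, k ∈ D ↔ k ∈ P.map (fun p => p.1) := by
      intro k
      rw [hD, PySem.List.mem_sorted, PySem.Set.mem_ofList]
    have hsD : pivot ∈ D := (hmemD pivot).2 (by simp [hP])
    -- identify the sub-runs of D with the distinct keys of the two partitions
    have hside : ∀ (q : Int → Int → Prop) [DecidableRel q],
        PySem.List.sorted (PySem.Set.ofList ((P.filter (fun p => decide (q pivot p.1))).map (fun p => p.1)))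
          (fun k => k) true = D.filter (fun k => decide (q pivot k)) := by
      intro q _
      apply PySem.List.sorted_rev_eq_of_perm_of_pairwise_gt
      · -- permutation: both nodup with the same members
        refine (List.perm_ext_iff_of_nodup (hDnodup.filter _) (PySem.Set.nodup_ofList _)).2 ?_
        intro k
        simp only [List.mem_filter, hmemD k, PySem.Set.mem_ofList, List.mem_map,
          List.mem_filter, decide_eq_true_eq]
        constructor
        · rintro ⟨⟨p, hp, hpk⟩, hq⟩
          exact ⟨p, ⟨hp, by rw [hpk]; exact hq⟩, hpk⟩
        · rintro ⟨p, ⟨hp, hq⟩, hpk⟩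
          exact ⟨⟨p, hp, hpk⟩, by rw [← hpk]; exact hq⟩
      · exact hDpw.filter _
    -- for a key on one side of the pivot, the bucket of P is the bucket of the partition
    have hbucket : ∀ (q : Int → Int → Prop) [DecidableRel q], ∀ k : Int, q pivot k →
        (P.filter (fun p => decide (q pivot p.1))).filter (fun p => p.1 == k)
          = P.filter (fun p => p.1 == k) := by
      intro q _ k hq
      rw [List.filter_filter]
      apply List.filter_congr
      intro p _
      by_cases h : p.1 = k
      · simp [h, hq]
      · simp [h]
    have key_eq : ∀ (q : Int → Int → Prop) [DecidableRel q],
        (PySem.List.sorted (P.filter (fun p => decide (q pivot p.1))) (fun p => p.1) true).map Prod.snd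
          = ((D.filter (fun k => decide (q pivot k))).flatMap
              (fun k => P.filter (fun p => p.1 == k))).map Prod.snd := by
      intro q _
      rw [pv_sortedRev_eq_flatMap (P.filter (fun p => decide (q pivot p.1))) (fun p => p.1), hside q]
      congr 1
      apply List.flatMap_congr
      intro k hk
      have hq : q pivot k := by
        have := (List.mem_filter.1 hk).2
        simpa using this
      rw [hbucket q k hq]
    -- assemble
    rw [pv_sortedRev_eq_flatMap P (fun p => p.1), ← hD]
    conv_rhs => rw [pv_desc_split D pivot hDpw hsD]
    rw [List.append_assoc, List.flatMap_append, List.flatMap_append, List.map_append,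
      List.map_append, List.flatMap_cons, List.flatMap_nil, List.append_nil]
    conv_lhs => rw [pvRank]
    rw [ih_gt, ih_lt]
    rw [key_eq (fun a b => a < b), key_eq (fun a b => b < a), ← hP, List.append_assoc]

-- ===== VERDICT (by name: the statement is the Claim_ definition above) =====
theorem find_relevant_messages_spec : Claim_equal_find_relevant_messages := by
  unfold Claim_equal_find_relevant_messages
  intro query messages top_k _
  unfold Spec_find_relevant_messages find_relevant_messages find_relevant_messages_alt
  simp only []
  by_cases hm : messages = []
  · simp [hm]
  simp only [hm, if_false]
  have hA : messages.foldl (fun acc msg =>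
        if 0 < pvOverlap (pvWords query) msg then acc ++ [(pvOverlap (pvWords query) msg, msg)] else acc) []
      = (messages.filter (fun m => decide (0 < pvOverlap (pvWords query) m))).map
          (fun m => (pvOverlap (pvWords query) m, m)) := by
    rw [PySem.List.foldl_append_ite (p := fun m => 0 < pvOverlap (pvWords query) m)
      (f := fun m => (pvOverlap (pvWords query) m, m))]
    simp
  rw [hA]
  set scored := (messages.filter (fun m => decide (0 < pvOverlap (pvWords query) m))).map
      (fun m => (pvOverlap (pvWords query) m, m)) with hscored
  have hcond : (PySem.List.sorted scored (fun x => x.1) true = []) ↔ scored = [] :=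
    PySem.List.sorted_eq_nil_iff scored (fun x => x.1) true
  by_cases hnil : scored = []
  · rw [if_pos (hcond.2 hnil), if_pos hnil]
  · rw [if_neg (fun h => hnil (hcond.1 h)), if_neg hnil]
    rw [pvRank_eq scored, ← pv_slice_map]
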